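-- pv_equiv track=rewrite | github.com/Ferrari25/ParserASDPpy | Automatas.py | automata_mostrar
-- ===== SOURCE A (Python) =====
-- ESTADO_FINAL = "ESTADO FINAL"
--
-- ESTADO_NO_FINAL = "NO ACEPTADO"
--
-- ESTADO_TRAMPA = "EN ESTADO TRAMPA"
--
-- def automata_mostrar(lexema):
--         estadoactual=0
--         estadosfinales=[7]
--         for vcarac in lexema:
--             if estadoactual==0 and vcarac=='m':
--                 estadoactual= 1
--             elif estadoactual==1 and vcarac=='o':
--                 estadoactual=2
--             elif estadoactual==2 and vcarac=='s':
--                 estadoactual=3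
--             elif estadoactual==3 and vcarac=='t':
--                 estadoactual=4
--             elif estadoactual==4 and vcarac=='r':
--                 estadoactual=5
--             elif estadoactual==5 and vcarac=='a':
--                 estadoactual=6
--             elif estadoactual==6 and vcarac=='r':
--                 estadoactual=7
--             else:
--                 estadoactual=-1
--                 break
--         if estadoactual == -1:
--              return ESTADO_TRAMPA + "automata"
--         if estadoactual in estadosfinales:
--             return ESTADO_FINAL
--         else:
--             return ESTADO_NO_FINAL
-- ===== SOURCE B (Python) =====
-- ESTADO_FINAL = "ESTADO FINAL"
--
-- ESTADO_NO_FINAL = "NO ACEPTADO"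
--
-- ESTADO_TRAMPA = "EN ESTADO TRAMPA"
--
-- def automata_mostrar(lexema):
--     if lexema == "mostrar":
--         return ESTADO_FINAL
--     if "mostrar".startswith(lexema):
--         return ESTADO_NO_FINAL
--     return ESTADO_TRAMPA + "automata"
-- ===== Notes on version B (the rewrite author's own statement) =====
-- stated objective: simpler
-- what changed: Replaced the hand-coded 8-state DFA loop that advances an integer state character by character with a closed-form classification: exact match gives ESTADO_FINAL, a proper prefix of 'mostrar' gives ESTADO_NO_FINAL, anything else the trap string.
import Mathlib
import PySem

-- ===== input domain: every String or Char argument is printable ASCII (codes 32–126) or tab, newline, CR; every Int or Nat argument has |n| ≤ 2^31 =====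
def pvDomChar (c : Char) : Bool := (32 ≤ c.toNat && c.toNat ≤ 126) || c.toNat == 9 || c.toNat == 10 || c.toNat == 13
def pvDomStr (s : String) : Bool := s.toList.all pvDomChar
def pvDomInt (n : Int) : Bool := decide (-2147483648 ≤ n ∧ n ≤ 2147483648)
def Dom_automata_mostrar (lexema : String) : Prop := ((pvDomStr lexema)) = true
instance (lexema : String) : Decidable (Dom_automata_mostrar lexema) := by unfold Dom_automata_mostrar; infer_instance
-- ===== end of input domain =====

-- B replaces the hand-coded integer-state DFA loop with a closed-form prefix classification (objective: simpler).

-- ===== PORT A =====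
-- the for-loop with its early break: advances the integer state, or sets -1 and stops
def automata_mostrar_loop : Int → List Char → Int
  | estadoactual, [] => estadoactual
  | estadoactual, vcarac :: rest =>
    if estadoactual = 0 ∧ vcarac = 'm' then automata_mostrar_loop 1 rest
    else if estadoactual = 1 ∧ vcarac = 'o' then automata_mostrar_loop 2 rest
    else if estadoactual = 2 ∧ vcarac = 's' then automata_mostrar_loop 3 rest
    else if estadoactual = 3 ∧ vcarac = 't' then automata_mostrar_loop 4 rest
    else if estadoactual = 4 ∧ vcarac = 'r' then automata_mostrar_loop 5 rest
    else if estadoactual = 5 ∧ vcarac = 'a' then automata_mostrar_loop 6 rest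
    else if estadoactual = 6 ∧ vcarac = 'r' then automata_mostrar_loop 7 rest
    else (-1)     -- estadoactual = -1 ; break

def automata_mostrar (lexema : String) : String :=
  let estadoactual := automata_mostrar_loop 0 lexema.toList
  let estadosfinales : List Int := [7]
  if estadoactual = -1 then "EN ESTADO TRAMPA" ++ "automata"
  else if estadoactual ∈ estadosfinales then "ESTADO FINAL"
  else "NO ACEPTADO"

-- ===== PORT B =====
def automata_mostrar_alt (lexema : String) : String :=
  if lexema = "mostrar" then "ESTADO FINAL"
  else if PySem.Str.startswith "mostrar" lexema then "NO ACEPTADO"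
  else "EN ESTADO TRAMPA" ++ "automata"

-- ===== PRECONDITION & SPEC =====
def Spec_automata_mostrar (lexema : String) (out : String) : Prop := out = automata_mostrar_alt lexema
instance (lexema : String) (out : String) : Decidable (Spec_automata_mostrar lexema out) := by unfold Spec_automata_mostrar; infer_instance

-- ===== CLAIM (what is proved, stated in full; the proofs are below) =====
def Claim_equal_automata_mostrar : Prop := ∀ (lexema : String), Dom_automata_mostrar lexema → Spec_automata_mostrar lexema (automata_mostrar lexema)

-- ===== LEMMAS AND PROOFS =====
-- A's loop from state k ends in k + |cs| when cs is a prefix of the word still to be read, else in -1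
lemma automata_mostrar_loop7_spec (cs : List Char) :
    automata_mostrar_loop 7 cs = if cs <+: ([] : List Char) then (7 + cs.length : Int) else -1 := by
  cases cs with
  | nil => simp [automata_mostrar_loop]
  | cons c rest => simp [automata_mostrar_loop]

lemma automata_mostrar_loop6_spec (cs : List Char) :
    automata_mostrar_loop 6 cs = if cs <+: (['r'] : List Char) then (6 + cs.length : Int) else -1 := by
  cases cs with
  | nil => simp [automata_mostrar_loop]
  | cons c rest =>
    by_cases hc : c = 'r'
    · subst hc
      simp only [automata_mostrar_loop, List.cons_prefix_cons]
      rw [automata_mostrar_loop7_spec rest]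
      split_ifs with h1 h2 h2 <;> simp_all <;> try omega
    · simp [automata_mostrar_loop, hc, List.cons_prefix_cons]

lemma automata_mostrar_loop5_spec (cs : List Char) :
    automata_mostrar_loop 5 cs = if cs <+: (['a', 'r'] : List Char) then (5 + cs.length : Int) else -1 := by
  cases cs with
  | nil => simp [automata_mostrar_loop]
  | cons c rest =>
    by_cases hc : c = 'a'
    · subst hc
      simp only [automata_mostrar_loop, List.cons_prefix_cons]
      rw [automata_mostrar_loop6_spec rest]
      split_ifs with h1 h2 h2 <;> simp_all <;> try omega
    · simp [automata_mostrar_loop, hc, List.cons_prefix_cons]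

lemma automata_mostrar_loop4_spec (cs : List Char) :
    automata_mostrar_loop 4 cs = if cs <+: (['r', 'a', 'r'] : List Char) then (4 + cs.length : Int) else -1 := by
  cases cs with
  | nil => simp [automata_mostrar_loop]
  | cons c rest =>
    by_cases hc : c = 'r'
    · subst hc
      simp only [automata_mostrar_loop, List.cons_prefix_cons]
      rw [automata_mostrar_loop5_spec rest]
      split_ifs with h1 h2 h2 <;> simp_all <;> try omega
    · simp [automata_mostrar_loop, hc, List.cons_prefix_cons]

lemma automata_mostrar_loop3_spec (cs : List Char) :
    automata_mostrar_loop 3 cs = if cs <+: (['t', 'r', 'a', 'r'] : List Char) then (3 + cs.length : Int) else -1 := by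
  cases cs with
  | nil => simp [automata_mostrar_loop]
  | cons c rest =>
    by_cases hc : c = 't'
    · subst hc
      simp only [automata_mostrar_loop, List.cons_prefix_cons]
      rw [automata_mostrar_loop4_spec rest]
      split_ifs with h1 h2 h2 <;> simp_all <;> try omega
    · simp [automata_mostrar_loop, hc, List.cons_prefix_cons]

lemma automata_mostrar_loop2_spec (cs : List Char) :
    automata_mostrar_loop 2 cs = if cs <+: (['s', 't', 'r', 'a', 'r'] : List Char) then (2 + cs.length : Int) else -1 := by
  cases cs with
  | nil => simp [automata_mostrar_loop]
  | cons c rest =>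
    by_cases hc : c = 's'
    · subst hc
      simp only [automata_mostrar_loop, List.cons_prefix_cons]
      rw [automata_mostrar_loop3_spec rest]
      split_ifs with h1 h2 h2 <;> simp_all <;> try omega
    · simp [automata_mostrar_loop, hc, List.cons_prefix_cons]

lemma automata_mostrar_loop1_spec (cs : List Char) :
    automata_mostrar_loop 1 cs = if cs <+: (['o', 's', 't', 'r', 'a', 'r'] : List Char) then (1 + cs.length : Int) else -1 := by
  cases cs with
  | nil => simp [automata_mostrar_loop]
  | cons c rest =>
    by_cases hc : c = 'o'
    · subst hc
      simp only [automata_mostrar_loop, List.cons_prefix_cons]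
      rw [automata_mostrar_loop2_spec rest]
      split_ifs with h1 h2 h2 <;> simp_all <;> try omega
    · simp [automata_mostrar_loop, hc, List.cons_prefix_cons]

lemma automata_mostrar_loop0_spec (cs : List Char) :
    automata_mostrar_loop 0 cs = if cs <+: (['m', 'o', 's', 't', 'r', 'a', 'r'] : List Char) then (0 + cs.length : Int) else -1 := by
  cases cs with
  | nil => simp [automata_mostrar_loop]
  | cons c rest =>
    by_cases hc : c = 'm'
    · subst hc
      simp only [automata_mostrar_loop, List.cons_prefix_cons]
      rw [automata_mostrar_loop1_spec rest]
      split_ifs with h1 h2 h2 <;> simp_all <;> try omega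
    · simp [automata_mostrar_loop, hc, List.cons_prefix_cons]
-- ===== VERDICT (by name: the statement is the Claim_ definition above) =====
theorem automata_mostrar_spec : Claim_equal_automata_mostrar := by
  intro lexema _
  unfold Spec_automata_mostrar automata_mostrar automata_mostrar_alt
  rw [automata_mostrar_loop0_spec lexema.toList]
  have hw : ("mostrar" : String).toList = ['m','o','s','t','r','a','r'] := by decide
  have hsw : PySem.Str.startswith "mostrar" lexema = true ↔ lexema.toList <+: ['m','o','s','t','r','a','r'] := by
    rw [PySem.Str.startswith_eq, PySem.Chars.startswith_iff, hw]
  have heq : (lexema = "mostrar") ↔ lexema.toList = ['m','o','s','t','r','a','r'] := by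
    rw [← hw]
    constructor
    · intro h; rw [h]
    · intro h; exact String.ext (by simpa using h)
  by_cases hpre : lexema.toList <+: ['m','o','s','t','r','a','r']
  · have hle : lexema.length ≤ 7 := by simpa using hpre.length_le
    by_cases hfull : lexema.toList = ['m','o','s','t','r','a','r']
    · simp [heq.mpr hfull]
    · have hlen : lexema.length < 7 := by
        rcases Nat.lt_or_ge lexema.length 7 with h7 | h7
        · exact h7
        · exact absurd (List.IsPrefix.eq_of_length hpre (by simp; omega)) hfull
      have hne : ¬ (lexema = "mostrar") := fun h => hfull (heq.mp h)
      have hst : PySem.Str.startswith "mostrar" lexema = true := hsw.mpr hpre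
      have h1 : ¬((lexema.length : Int) = -1) := by omega
      have h2 : ¬((lexema.length : Int) = 7) := by omega
      simp only [hst, hne, if_false, if_true]
      simp [hpre, h1, h2]
  · have hne : ¬ (lexema = "mostrar") := by
      intro h; exact hpre (heq.mp h ▸ List.prefix_refl _)
    have hst : PySem.Str.startswith "mostrar" lexema = false := by
      rw [← Bool.not_eq_true]; intro h; exact hpre (hsw.mp h)
    simp only [hst, hne, if_false, Bool.false_eq_true]
    simp [hpre]
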